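-- pv_equiv track=rewrite | github.com/IgnacioHernandezBas/verifier_harness | verifier/rules/helpers.py | is_documentation_only_patch
-- ===== SOURCE A (Python) =====
-- from typing import Any, Callable, Dict, Iterable, List, Optional, Tuple
--
-- def parse_patch_by_file(patch_str: str) -> Dict[str, Dict[str, List[str]]]:
--     """Collect added and removed lines for each file in a patch."""
--     data: Dict[str, Dict[str, List[str]]] = {}
--     current_file: Optional[str] = None
--     for line in patch_str.splitlines():
--         if line.startswith("+++ "):
--             path = line[4:].strip()
--             if path.startswith("b/"):
--                 path = path[2:]
--             current_file = path
--             data.setdefault(path, {"added": [], "removed": []})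
--             continue
--         if current_file is None:
--             continue
--         if line.startswith("+") and not line.startswith("+++"):
--             data[current_file]["added"].append(line[1:])
--         elif line.startswith("-") and not line.startswith("---"):
--             data[current_file]["removed"].append(line[1:])
--     return data
--
-- def is_documentation_only_patch(patch_str: str) -> bool:
--     """
--     Determine if a patch only modifies documentation/comments.
--
--     Returns True if the patch appears to only change:
--     - Docstrings (triple-quoted strings)
--     - Comments (lines starting with #)
--     - Whitespace/formatting
--     - Documentation files (.md, .rst, .txt)
--
--     Returns False if it modifies executable Python code.
--     """
--     patch_data = parse_patch_by_file(patch_str)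
--
--     for file_path, changes in patch_data.items():
--         # Check if it's a documentation file
--         if file_path.endswith(('.md', '.rst', '.txt', '.html', '.xml')):
--             continue
--
--         # For Python files, check if changes are code or docs
--         if file_path.endswith('.py'):
--             all_lines = changes['added'] + changes['removed']
--
--             for line in all_lines:
--                 stripped = line.strip()
--
--                 # Skip empty lines
--                 if not stripped:
--                     continue
--
--                 # Skip comment lines
--                 if stripped.startswith('#'):
--                     continue
--
--                 # Skip docstring markers and content (basic heuristic)
--                 if stripped.startswith('"""') or stripped.startswith("'''"):
--                     continue
--                 if '"""' in stripped or "'''" in stripped: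
--                     continue
--
--                 # Skip lines that look like docstring content
--                 # (indented text without code-like syntax)
--                 if not any(char in stripped for char in ['=', '(', ')', '[', ']', '{', '}', 'def ', 'class ', 'import ', 'from ', 'return ', 'if ', 'for ', 'while ']):
--                     # Likely docstring content
--                     continue
--
--                 # If we get here, it's likely executable code
--                 return False
--
--     return True
-- ===== SOURCE B (Python) =====
-- def is_documentation_only_patch(patch_str: str) -> bool:
--     """Single streaming pass: track whether the current diff header names a .py
--     file and return False at the first changed line judged to be code."""
--     in_py = False
--     for line in patch_str.splitlines():
--         if line.startswith("+++ "):
--             path = line[4:].strip()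
--             if path.startswith("b/"):
--                 path = path[2:]
--             in_py = path.endswith(".py")
--             continue
--         if in_py and ((line.startswith("+") and not line.startswith("+++"))
--                       or (line.startswith("-") and not line.startswith("---"))):
--             stripped = line[1:].strip()
--             if not stripped:
--                 continue
--             if stripped.startswith("#"):
--                 continue
--             if stripped.startswith('"""') or stripped.startswith("'''"):
--                 continue
--             if '"""' in stripped or "'''" in stripped:
--                 continue
--             if not any(tok in stripped for tok in (
--                     "=", "(", ")", "[", "]", "{", "}", "def ", "class ",
--                     "import ", "from ", "return ", "if ", "for ", "while ")):
--                 continue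
--             return False
--     return True
-- ===== Notes on version B (the rewrite author's own statement) =====
-- stated objective: simpler
-- what changed: Replaced the two-phase design (build a per-file dict of added/removed lines, then scan it) by one streaming pass over the patch lines that tracks only whether the file named by the current diff header is a .py file and returns False at the first changed line judged to be code.
import Mathlib
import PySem

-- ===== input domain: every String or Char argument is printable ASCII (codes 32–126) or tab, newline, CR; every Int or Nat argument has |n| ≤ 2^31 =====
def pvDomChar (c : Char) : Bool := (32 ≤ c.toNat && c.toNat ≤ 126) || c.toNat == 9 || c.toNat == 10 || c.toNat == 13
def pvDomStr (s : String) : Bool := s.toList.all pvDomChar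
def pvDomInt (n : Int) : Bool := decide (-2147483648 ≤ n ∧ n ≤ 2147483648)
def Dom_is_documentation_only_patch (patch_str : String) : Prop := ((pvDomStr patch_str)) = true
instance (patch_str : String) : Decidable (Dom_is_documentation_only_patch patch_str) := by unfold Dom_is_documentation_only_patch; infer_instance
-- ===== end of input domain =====

-- B is the same heuristic as one streaming pass over the patch lines (tracking only the current file, no per-file dict): simpler.

-- ===== PORT A =====

def pvDocExts : List String := [".md", ".rst", ".txt", ".html", ".xml"]

def pvCodeTokens : List String :=
  ["=", "(", ")", "[", "]", "{", "}", "def ", "class ", "import ", "from ",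
   "return ", "if ", "for ", "while "]

-- the body of A's per-line loop in parse_patch_by_file
def pvStepA (st : PySem.Dict String (List String × List String) × Option String)
    (line : String) : PySem.Dict String (List String × List String) × Option String :=
  if PySem.Str.startswith line "+++ " then
    let path := PySem.Str.strip (PySem.Str.slice line (some 4) none)
    let path := if PySem.Str.startswith path "b/" then PySem.Str.slice path (some 2) none else path
    (st.1.setdefault path ([], []), some path)
  else
    match st.2 with
    | none => st
    | some cur =>
      if PySem.Str.startswith line "+" && !PySem.Str.startswith line "+++" then
        (st.1.modify cur ([], []) (fun p => (p.1 ++ [PySem.Str.slice line (some 1) none], p.2)), st.2)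
      else if PySem.Str.startswith line "-" && !PySem.Str.startswith line "---" then
        (st.1.modify cur ([], []) (fun p => (p.1, p.2 ++ [PySem.Str.slice line (some 1) none])), st.2)
      else st

def parse_patch_by_file (patch_str : String) : PySem.Dict String (List String × List String) :=
  ((PySem.Str.splitlines patch_str).foldl pvStepA (PySem.Dict.empty, none)).1

-- body of A's inner per-line check: true = "likely executable code" (A's `return False`)
def pvIsCodeA (line : String) : Bool :=
  let stripped := PySem.Str.strip line
  if PySem.Str.len stripped == 0 then false
  else if PySem.Str.startswith stripped "#" then false
  else if PySem.Str.startswith stripped "\"\"\"" || PySem.Str.startswith stripped "'''" then false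
  else if PySem.Str.isIn "\"\"\"" stripped || PySem.Str.isIn "'''" stripped then false
  else if !(pvCodeTokens.any (fun t => PySem.Str.isIn t stripped)) then false
  else true

def is_documentation_only_patch (patch_str : String) : Bool :=
  (parse_patch_by_file patch_str).items.all (fun kv =>
    if pvDocExts.any (fun e => PySem.Str.endswith kv.1 e) then true
    else if PySem.Str.endswith kv.1 ".py" then
      (kv.2.1 ++ kv.2.2).all (fun l => !pvIsCodeA l)
    else true)

-- ===== PORT B =====

-- B's per-line check (identical heuristic, applied inline in the streaming loop)
def pvIsCodeB (line : String) : Bool :=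
  let stripped := PySem.Str.strip line
  if PySem.Str.len stripped == 0 then false
  else if PySem.Str.startswith stripped "#" then false
  else if PySem.Str.startswith stripped "\"\"\"" || PySem.Str.startswith stripped "'''" then false
  else if PySem.Str.isIn "\"\"\"" stripped || PySem.Str.isIn "'''" stripped then false
  else if !(["=", "(", ")", "[", "]", "{", "}", "def ", "class ", "import ", "from ",
             "return ", "if ", "for ", "while "].any (fun t => PySem.Str.isIn t stripped)) then false
  else true

-- B's streaming loop: carries only the "current file is .py" flag; early return = false
def pvScanB : List String → Bool → Bool
  | [], _ => true
  | line :: rest, inPy =>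
    if PySem.Str.startswith line "+++ " then
      let path := PySem.Str.strip (PySem.Str.slice line (some 4) none)
      let path := if PySem.Str.startswith path "b/" then PySem.Str.slice path (some 2) none else path
      pvScanB rest (PySem.Str.endswith path ".py")
    else if inPy && ((PySem.Str.startswith line "+" && !PySem.Str.startswith line "+++")
                     || (PySem.Str.startswith line "-" && !PySem.Str.startswith line "---")) then
      if pvIsCodeB (PySem.Str.slice line (some 1) none) then false else pvScanB rest inPy
    else pvScanB rest inPy

def is_documentation_only_patch_alt (patch_str : String) : Bool :=
  pvScanB (PySem.Str.splitlines patch_str) false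

-- ===== PRECONDITION & SPEC =====
def Spec_is_documentation_only_patch (patch_str : String) (out : Bool) : Prop := out = is_documentation_only_patch_alt patch_str
instance (patch_str : String) (out : Bool) : Decidable (Spec_is_documentation_only_patch patch_str out) := by unfold Spec_is_documentation_only_patch; infer_instance

-- ===== CLAIM (what is proved, stated in full; the proofs are below) =====
def Claim_equal_is_documentation_only_patch : Prop := ∀ (patch_str : String), Dom_is_documentation_only_patch patch_str → Spec_is_documentation_only_patch patch_str (is_documentation_only_patch patch_str)

-- ===== LEMMAS AND PROOFS =====

-- A's final check as a function of the dict
def pvCheck (d : PySem.Dict String (List String × List String)) : Bool :=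
  d.items.all (fun kv =>
    if pvDocExts.any (fun e => PySem.Str.endswith kv.1 e) then true
    else if PySem.Str.endswith kv.1 ".py" then
      (kv.2.1 ++ kv.2.2).all (fun l => !pvIsCodeA l)
    else true)

-- B's flag as a function of A's current-file state
def pvFlag : Option String → Bool
  | none => false
  | some c => PySem.Str.endswith c ".py"

-- A's per-key check read off the dict by key
def pvG (d : PySem.Dict String (List String × List String)) (k : String) : Bool :=
  if pvDocExts.any (fun e => PySem.Str.endswith k e) then true
  else if PySem.Str.endswith k ".py" then
    ((d.getD k ([], [])).1 ++ (d.getD k ([], [])).2).all (fun l => !pvIsCodeA l)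
  else true

-- contribution of one diff line recorded under path c
def pvDelta (c : String) (l' : String) : Bool :=
  if pvDocExts.any (fun e => PySem.Str.endswith c e) then true
  else if PySem.Str.endswith c ".py" then !pvIsCodeA l'
  else true

theorem pv_all_congr_mem {α : Type} (l : List α) (p q : α → Bool)
    (h : ∀ x ∈ l, p x = q x) : l.all p = l.all q := by
  induction l with
  | nil => rfl
  | cons a t ih => simp only [List.all_cons, h a (by simp), ih (fun x hx => h x (by simp [hx]))]

theorem pv_all_and {α : Type} (l : List α) (p q : α → Bool) :
    l.all (fun x => p x && q x) = (l.all p && l.all q) := by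
  induction l with
  | nil => rfl
  | cons a t ih => simp only [List.all_cons, ih]; cases p a <;> cases q a <;> simp

theorem pv_all_ite {α : Type} [DecidableEq α] {l : List α} {c : α} (hc : c ∈ l) (b : Bool) :
    l.all (fun k => if k = c then b else true) = b := by
  cases b with
  | true => simp
  | false => exact List.all_eq_false.mpr ⟨c, hc, by simp⟩

-- a path ending in ".py" ends in none of the documentation extensions
theorem pvPy_not_doc (p : String) (h : PySem.Str.endswith p ".py" = true) :
    pvDocExts.any (fun e => PySem.Str.endswith p e) = false := by
  have hpy : ['.', 'p', 'y'] <:+ p.toList := by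
    have := (PySem.Chars.endswith_iff p.toList ".py".toList).mp (by simpa using h)
    simpa using this
  simp only [pvDocExts, List.any_cons, List.any_nil, Bool.or_false, Bool.or_eq_false_iff]
  refine ⟨?_, ?_, ?_, ?_, ?_⟩ <;>
  · rw [Bool.eq_false_iff]
    intro he
    have hs := (PySem.Chars.endswith_iff p.toList _).mp (by simpa using he)
    obtain ⟨t1, e1⟩ := hpy
    obtain ⟨t2, e2⟩ := hs
    have := congrArg List.getLast? (e1.trans e2.symm)
    simp at this

theorem pvDelta_eq (c l' : String) :
    pvDelta c l' = !(PySem.Str.endswith c ".py" && pvIsCodeA l') := by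
  unfold pvDelta
  by_cases hp : PySem.Str.endswith c ".py" = true
  · rw [pvPy_not_doc c hp, hp]; simp
  · simp only [Bool.not_eq_true] at hp
    rw [hp]; split_ifs <;> simp_all

theorem pvGetD_not_contains (d : PySem.Dict String (List String × List String)) (k : String)
    (h : d.contains k = false) : d.getD k ([], []) = ([], []) := by
  simp [PySem.Dict.getD, (PySem.Dict.get?_eq_none_iff_contains d k).mpr h]

-- per-key reading of pvCheck
theorem pvCheck_eq_keys (d : PySem.Dict String (List String × List String))
    (h : d.keys.Nodup) : pvCheck d = d.keys.all (pvG d) := by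
  unfold pvCheck
  rw [PySem.Dict.keys, List.all_map]
  refine pv_all_congr_mem _ _ _ (fun kv hkv => ?_)
  have hget : d.get? kv.1 = some kv.2 := PySem.Dict.get?_of_mem_items d (by simpa using hkv) h
  simp [Function.comp, pvG, PySem.Dict.getD, hget]

-- the '+++' header step leaves A's verdict unchanged
theorem pvCheck_setdefault (d : PySem.Dict String (List String × List String))
    (_hn : d.keys.Nodup) (path : String) :
    pvCheck (d.setdefault path ([], [])) = pvCheck d := by
  by_cases hc : d.contains path = true
  · rw [PySem.Dict.setdefault_of_contains d _ hc]
  · rw [PySem.Dict.setdefault_of_not_contains d _ (by simpa using hc)]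
    unfold pvCheck
    rw [PySem.Dict.items_insert_of_not_contains d _ (by simpa using hc), List.all_append]
    simp

theorem pvNodup_setdefault (d : PySem.Dict String (List String × List String))
    (hn : d.keys.Nodup) (path : String) :
    (d.setdefault path ([], [])).keys.Nodup := by
  rw [PySem.Dict.keys_setdefault]
  split_ifs with hc
  · exact hn
  · simp only [Bool.not_eq_true] at hc
    have : path ∉ d.keys := fun hm => by
      simp [(PySem.Dict.contains_iff_mem_keys d path).mpr hm] at hc
    simpa [List.nodup_append] using ⟨hn, fun a ha he => this (he ▸ ha)⟩

theorem pvNodup_modify (d : PySem.Dict String (List String × List String))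
    (hn : d.keys.Nodup) (c : String) (g : List String × List String → List String × List String) :
    (d.modify c ([], []) g).keys.Nodup := by
  rw [PySem.Dict.keys_modify]
  exact PySem.Dict.nodup_keys_insert d c _ hn

-- recording one diff line multiplies A's verdict by pvDelta
theorem pvCheck_modify (d : PySem.Dict String (List String × List String))
    (hn : d.keys.Nodup) (c l' : String)
    (g : List String × List String → List String × List String)
    (hg : ∀ p : List String × List String,
      ((g p).1 ++ (g p).2).all (fun l => !pvIsCodeA l)
        = ((p.1 ++ p.2).all (fun l => !pvIsCodeA l) && !pvIsCodeA l')) :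
    pvCheck (d.modify c ([], []) g) = (pvCheck d && pvDelta c l') := by
  rw [pvCheck_eq_keys _ (pvNodup_modify d hn c g), pvCheck_eq_keys d hn]
  have hkeys : (d.modify c ([], []) g).keys = if d.contains c = true then d.keys else d.keys ++ [c] := by
    rw [PySem.Dict.keys_modify]
    split_ifs with hc
    · exact PySem.Dict.keys_insert_of_contains d _ hc
    · exact PySem.Dict.keys_insert_of_not_contains d _ (by simpa using hc)
  have hG : ∀ k, pvG (d.modify c ([], []) g) k = (pvG d k && (if k = c then pvDelta c l' else true)) := by
    intro k
    unfold pvG pvDelta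
    rw [PySem.Dict.getD_modify]
    by_cases hk : k = c
    · subst hk
      have h2 := hg (d.getD k ([], []))
      simp only [List.all_append] at h2
      split_ifs <;> simp [h2]
    · simp [hk]
  rw [hkeys]
  split_ifs with hc
  · rw [pv_all_congr_mem _ _ _ (fun k _ => hG k), pv_all_and, pv_all_ite ((PySem.Dict.contains_iff_mem_keys d c).mp hc)]
  · have hcm : c ∉ d.keys := fun hm => hc ((PySem.Dict.contains_iff_mem_keys d c).mpr hm)
    rw [List.all_append]
    rw [pv_all_congr_mem (d.keys) (pvG (d.modify c ([], []) g)) (pvG d)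
      (fun k hk => by rw [hG k, if_neg (fun he : k = c => hcm (he ▸ hk))]; simp)]
    have : pvG (d.modify c ([], []) g) c = pvDelta c l' := by
      have := hG c
      rw [if_pos rfl] at this
      rw [this]
      unfold pvG pvDelta
      rw [pvGetD_not_contains d c (by simpa using hc)]
      split_ifs <;> simp
    simp [this]

theorem pvIsCode_eq (l : String) : pvIsCodeB l = pvIsCodeA l := rfl

-- the header path computed by both loops
def pvPath (line : String) : String :=
  let path := PySem.Str.strip (PySem.Str.slice line (some 4) none)
  if PySem.Str.startswith path "b/" then PySem.Str.slice path (some 2) none else path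

theorem pvStepA_header (d : PySem.Dict String (List String × List String)) (cur : Option String)
    (line : String) (h : PySem.Str.startswith line "+++ " = true) :
    pvStepA (d, cur) line = (d.setdefault (pvPath line) ([], []), some (pvPath line)) := by
  unfold pvStepA pvPath
  rw [if_pos h]

theorem pvStepA_none (d : PySem.Dict String (List String × List String)) (line : String)
    (h : PySem.Str.startswith line "+++ " = false) :
    pvStepA (d, none) line = (d, none) := by
  unfold pvStepA
  rw [if_neg (by simp only [h]; simp)]

theorem pvStepA_plus (d : PySem.Dict String (List String × List String)) (c line : String)
    (h1 : PySem.Str.startswith line "+++ " = false)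
    (h2 : (PySem.Str.startswith line "+" && !PySem.Str.startswith line "+++") = true) :
    pvStepA (d, some c) line
      = (d.modify c ([], []) (fun p => (p.1 ++ [PySem.Str.slice line (some 1) none], p.2)), some c) := by
  unfold pvStepA
  rw [if_neg (by simp only [h1]; simp)]
  simp only [if_pos h2]

theorem pvStepA_minus (d : PySem.Dict String (List String × List String)) (c line : String)
    (h1 : PySem.Str.startswith line "+++ " = false)
    (h2 : (PySem.Str.startswith line "+" && !PySem.Str.startswith line "+++") = false)
    (h3 : (PySem.Str.startswith line "-" && !PySem.Str.startswith line "---") = true) :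
    pvStepA (d, some c) line
      = (d.modify c ([], []) (fun p => (p.1, p.2 ++ [PySem.Str.slice line (some 1) none])), some c) := by
  unfold pvStepA
  rw [if_neg (by simp only [h1]; simp)]
  simp only [h2, h3, Bool.false_eq_true, if_false, if_pos]

theorem pvStepA_other (d : PySem.Dict String (List String × List String)) (c line : String)
    (h1 : PySem.Str.startswith line "+++ " = false)
    (h2 : (PySem.Str.startswith line "+" && !PySem.Str.startswith line "+++") = false)
    (h3 : (PySem.Str.startswith line "-" && !PySem.Str.startswith line "---") = false) :
    pvStepA (d, some c) line = (d, some c) := by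
  unfold pvStepA
  rw [if_neg (by simp only [h1]; simp)]
  simp only [h2, h3, Bool.false_eq_true, if_false]

theorem pvScanB_header (line : String) (rest : List String) (b : Bool)
    (h : PySem.Str.startswith line "+++ " = true) :
    pvScanB (line :: rest) b = pvScanB rest (PySem.Str.endswith (pvPath line) ".py") := by
  conv_lhs => rw [pvScanB]
  rw [if_pos h]
  rfl

theorem pvScanB_diff (line : String) (rest : List String) (b : Bool)
    (h1 : PySem.Str.startswith line "+++ " = false)
    (h2 : ((PySem.Str.startswith line "+" && !PySem.Str.startswith line "+++")
        || (PySem.Str.startswith line "-" && !PySem.Str.startswith line "---")) = true) :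
    pvScanB (line :: rest) b
      = (if (b && pvIsCodeB (PySem.Str.slice line (some 1) none)) = true then false
         else pvScanB rest b) := by
  conv_lhs => rw [pvScanB]
  rw [if_neg (by simp only [h1]; simp)]
  cases b with
  | false => simp
  | true =>
    rw [if_pos (by rw [Bool.true_and, h2]), Bool.true_and]

theorem pvScanB_skip (line : String) (rest : List String) (b : Bool)
    (h1 : PySem.Str.startswith line "+++ " = false)
    (h2 : ((PySem.Str.startswith line "+" && !PySem.Str.startswith line "+++")
        || (PySem.Str.startswith line "-" && !PySem.Str.startswith line "---")) = false ∨ b = false) :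
    pvScanB (line :: rest) b = pvScanB rest b := by
  conv_lhs => rw [pvScanB]
  rw [if_neg (by simp only [h1]; simp),
    if_neg (by rcases h2 with h2 | h2 <;> simp only [h2, Bool.and_false, Bool.false_and] <;> simp)]

-- main invariant: A's verdict on the built dict = current verdict times B's streaming scan
theorem pvMain (lines : List String) :
    ∀ (d : PySem.Dict String (List String × List String)) (cur : Option String),
    d.keys.Nodup →
    pvCheck ((lines.foldl pvStepA (d, cur)).1) = (pvCheck d && pvScanB lines (pvFlag cur)) := by
  induction lines with
  | nil => intro d cur hn; simp [pvScanB]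
  | cons line rest ih =>
    intro d cur hn
    rw [List.foldl_cons]
    by_cases h1 : PySem.Str.startswith line "+++ " = true
    · rw [pvStepA_header d cur line h1, ih _ _ (pvNodup_setdefault d hn _),
        pvCheck_setdefault d hn, pvScanB_header line rest _ h1]
      rfl
    · rw [Bool.not_eq_true] at h1
      cases cur with
      | none =>
        simp only [pvFlag]
        rw [pvStepA_none d line h1, ih _ _ hn, pvScanB_skip line rest _ h1 (Or.inr rfl)]
        rfl
      | some c =>
        by_cases h2 : (PySem.Str.startswith line "+" && !PySem.Str.startswith line "+++") = true
        · rw [pvStepA_plus d c line h1 h2, ih _ _ (pvNodup_modify d hn c _),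
            pvCheck_modify d hn c (PySem.Str.slice line (some 1) none) _ (fun p => by
              simp [List.all_append, Bool.and_left_comm, Bool.and_comm]),
            pvDelta_eq, pvScanB_diff line rest _ h1 (by rw [h2]; rfl)]
          simp only [pvFlag, pvIsCode_eq]
          cases hpy : PySem.Str.endswith c ".py" <;>
            cases hcode : pvIsCodeA (PySem.Str.slice line (some 1) none) <;> simp
        · rw [Bool.not_eq_true] at h2
          by_cases h3 : (PySem.Str.startswith line "-" && !PySem.Str.startswith line "---") = true
          · rw [pvStepA_minus d c line h1 h2 h3, ih _ _ (pvNodup_modify d hn c _),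
              pvCheck_modify d hn c (PySem.Str.slice line (some 1) none) _ (fun p => by
                simp [List.all_append, Bool.and_left_comm, Bool.and_comm]),
              pvDelta_eq, pvScanB_diff line rest _ h1 (by rw [h2, h3]; rfl)]
            simp only [pvFlag, pvIsCode_eq]
            cases hpy : PySem.Str.endswith c ".py" <;>
              cases hcode : pvIsCodeA (PySem.Str.slice line (some 1) none) <;> simp
          · rw [Bool.not_eq_true] at h3
            rw [pvStepA_other d c line h1 h2 h3, ih _ _ hn,
              pvScanB_skip line rest _ h1 (Or.inl (by rw [h2, h3]; rfl))]


-- ===== VERDICT (by name: the statement is the Claim_ definition above) =====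
theorem is_documentation_only_patch_spec : Claim_equal_is_documentation_only_patch := by
  intro p _
  unfold Spec_is_documentation_only_patch is_documentation_only_patch is_documentation_only_patch_alt
    parse_patch_by_file
  have h := pvMain (PySem.Str.splitlines p) PySem.Dict.empty none PySem.Dict.nodup_keys_empty
  simpa [pvCheck, pvFlag, PySem.Dict.items, PySem.Dict.empty] using h
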